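-- pv_equiv track=rewrite | github.com/arnonmoscona/toolguard | config.py | merge_governed_tools
-- ===== SOURCE A (Python) =====
-- from typing import List, Tuple
--
-- def merge_governed_tools(tools_lists: List[List[str]]) -> List[str]:
--     """
--     Merge governed tools from multiple sources using union.
--
--     Args:
--         tools_lists: List of tool name lists from different sources
--
--     Returns:
--         List of unique tool names (order preserved from first occurrence)
--     """
--     all_tools = []
--
--     for tools in tools_lists:
--         all_tools.extend(tools)
--
--     # Remove duplicates while preserving order
--     seen = set()
--     unique_tools = []
--     for tool in all_tools:
--         if tool not in seen:
--             seen.add(tool)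
--             unique_tools.append(tool)
--
--     return unique_tools
-- ===== SOURCE B (Python) =====
-- def merge_governed_tools(tools_lists):
--     """Union of tool lists, first-occurrence order, sort-based:
--     a backward overwrite pass records each tool's FIRST index in the
--     flattened input, then the tools are sorted by that index."""
--     flat = [t for ts in tools_lists for t in ts]
--     first = {}
--     for i in range(len(flat) - 1, -1, -1):
--         first[flat[i]] = i
--     return sorted(first, key=first.get)
-- ===== Notes on version B (the rewrite author's own statement) =====
-- stated objective: alternative
-- what changed: Replaces A's forward seen-set/accumulator dedup pass with a sort-based algorithm: a backward overwrite pass records each tool's first-occurrence index in a dict, then the tools are sorted by that index; no seen set and no membership test exist in B.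
import Mathlib
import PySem

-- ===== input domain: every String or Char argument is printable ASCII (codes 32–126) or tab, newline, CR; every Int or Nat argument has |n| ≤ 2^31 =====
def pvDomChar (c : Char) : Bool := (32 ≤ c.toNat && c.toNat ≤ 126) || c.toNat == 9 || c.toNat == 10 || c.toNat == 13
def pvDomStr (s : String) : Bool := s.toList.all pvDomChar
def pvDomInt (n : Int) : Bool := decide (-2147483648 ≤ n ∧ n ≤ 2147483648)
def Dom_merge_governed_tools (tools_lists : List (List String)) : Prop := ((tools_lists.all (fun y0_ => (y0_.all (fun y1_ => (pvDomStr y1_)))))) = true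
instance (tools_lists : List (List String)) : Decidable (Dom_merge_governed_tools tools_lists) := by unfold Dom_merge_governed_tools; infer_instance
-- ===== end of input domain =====

-- B replaces A's seen-set dedup pass by a sort-based algorithm: a backward overwrite pass records each tool's first index, then the tools are sorted by that index (alternative decomposition, similar cost).

-- ===== PORT A =====
def merge_governed_tools (tools_lists : List (List String)) : List String :=
  -- all_tools = []; for tools in tools_lists: all_tools.extend(tools)
  let all_tools : List String := tools_lists.foldl (fun acc tools => acc ++ tools) []
  -- seen = set(); unique_tools = []; for tool in all_tools: ...
  let st : PySem.Set String × List String :=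
    all_tools.foldl
      (fun st tool =>
        if PySem.Set.contains st.1 tool then st
        else (PySem.Set.add st.1 tool, st.2 ++ [tool]))
      (PySem.Set.empty, [])
  st.2

-- ===== PORT B =====
def merge_governed_tools_alt (tools_lists : List (List String)) : List String :=
  -- flat = [t for ts in tools_lists for t in ts]
  let flat : List String := tools_lists.flatMap (fun ts => ts)
  -- first = {}; for i in range(len(flat)-1, -1, -1): first[flat[i]] = i
  -- (flat[i] ported as pyGetD with default "": exact, every i produced by the range is in [0, len(flat)))
  let first : PySem.Dict String Int :=
    (PySem.List.pyRange ((flat.length : Int) - 1) (-1) (-1)).foldl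
      (fun d i => d.insert (PySem.List.pyGetD flat i "") i) PySem.Dict.empty
  -- sorted(first, key=first.get): iterating a dict yields its keys; first.get k ported as
  -- getD with default 0: exact, every key iterated over is present in `first`
  PySem.List.sorted (PySem.Dict.keys first) (fun k => PySem.Dict.getD first k 0)

-- ===== PRECONDITION & SPEC =====
def Spec_merge_governed_tools (tools_lists : List (List String)) (out : List String) : Prop :=
  out = merge_governed_tools_alt tools_lists
instance (tools_lists : List (List String)) (out : List String) : Decidable (Spec_merge_governed_tools tools_lists out) := by
  unfold Spec_merge_governed_tools; infer_instance

-- ===== CLAIM =====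
def Claim_equal_merge_governed_tools : Prop :=
  ∀ (tools_lists : List (List String)), Dom_merge_governed_tools tools_lists →
    Spec_merge_governed_tools tools_lists (merge_governed_tools tools_lists)

-- ===== LEMMAS AND PROOFS =====
-- A's dedup loop, started from a set s paired with the list s itself, computes Set.update s l twice.
theorem dedup_loop_eq_update (l : List String) (s : PySem.Set String) :
    l.foldl
      (fun (st : PySem.Set String × List String) tool =>
        if PySem.Set.contains st.1 tool then st
        else (PySem.Set.add st.1 tool, st.2 ++ [tool]))
      (s, s)
    = (PySem.Set.update s l, PySem.Set.update s l) := by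
  induction l generalizing s with
  | nil => simp [PySem.Set.update]
  | cons x xs ih =>
    simp only [List.foldl_cons, PySem.Set.update_cons]
    by_cases hx : x ∈ s
    · rw [if_pos (by simpa [PySem.Set.contains_iff] using hx),
        PySem.Set.add_of_mem hx]
      exact ih s
    · rw [if_neg (by simpa [PySem.Set.contains_iff] using hx),
        PySem.Set.add_of_not_mem hx]
      exact ih (s ++ [x])

-- A's result is the ordered dedup of the flattened input
theorem portA_eq_dedup (tools_lists : List (List String)) :
    merge_governed_tools tools_lists
    = PySem.List.dedup (tools_lists.flatMap (fun ts => ts)) := by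
  unfold merge_governed_tools
  rw [PySem.List.foldl_append_eq_flatMap]
  simp only [List.nil_append]
  have h := dedup_loop_eq_update (tools_lists.flatMap (fun tools => tools)) PySem.Set.empty
  simp only [PySem.Set.empty] at h ⊢
  rw [h, PySem.Set.update_nil_left, ← PySem.List.dedup_eq_ofList]

-- B's backward overwrite loop: get? of the resulting dict is the FIRST index of the key
theorem foldget (l : List String) (d : PySem.Dict String Int) (k : String) :
    (((PySem.List.pyRange ((l.length : Int) - 1) (-1) (-1)).foldl
        (fun d i => d.insert (PySem.List.pyGetD l i "") i) d).get? k)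
    = match PySem.List.index? l k with
      | some j => some (j : Int)
      | none => d.get? k := by
  induction l using List.reverseRecOn generalizing d with
  | nil =>
    rw [PySem.List.pyRange_neg_one_eq_nil (by norm_num)]
    simp [PySem.List.index?]
  | append_singleton ys z ih =>
    have hlen : ((ys ++ [z]).length : Int) - 1 = (ys.length : Int) := by
      simp
    rw [hlen, PySem.List.pyRange_neg_one_cons (by omega), List.foldl_cons]
    have hz : PySem.List.pyGetD (ys ++ [z]) (ys.length : Int) "" = z := by
      rw [PySem.List.pyGetD_eq_getElem _ _ (by positivity) (by simp)]
      simp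
    rw [hz]
    have hcongr :
        (PySem.List.pyRange ((ys.length : Int) - 1) (-1) (-1)).foldl
          (fun d i => d.insert (PySem.List.pyGetD (ys ++ [z]) i "") i)
          (d.insert z (ys.length : Int))
        = (PySem.List.pyRange ((ys.length : Int) - 1) (-1) (-1)).foldl
          (fun d i => d.insert (PySem.List.pyGetD ys i "") i)
          (d.insert z (ys.length : Int)) := by
      apply PySem.List.foldl_congr_mem
      intro acc i hi
      rw [PySem.List.mem_pyRange_neg_one] at hi
      have h0 : 0 ≤ i := by omega
      have h1 : i < (ys.length : Int) := by omega
      rw [PySem.List.pyGetD_eq_getElem _ _ h0 (by simp; omega),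
        PySem.List.pyGetD_eq_getElem _ _ h0 h1,
        List.getElem_append_left (by omega)]
    rw [hcongr, ih]
    by_cases hk : k ∈ ys
    · obtain ⟨j, hj⟩ := Option.isSome_iff_exists.mp
        ((PySem.List.index?_isSome_iff ys k).mpr hk)
      rw [hj, PySem.List.index?_append_of_mem [z] hk, hj]
    · rw [(PySem.List.index?_eq_none_iff ys k).mpr hk]
      by_cases hz' : k = z
      · subst hz'
        rw [PySem.List.index?_append_singleton_self ys k hk,
          PySem.Dict.get?_insert]
        simp
      · have : PySem.List.index? (ys ++ [z]) k = none := by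
          rw [PySem.List.index?_eq_none_iff]
          simp [hk, hz']
        rw [this, PySem.Dict.get?_insert, if_neg hz']

-- index? of a member is some of idxOf
theorem index?_eq_some_idxOf (l : List String) (a : String) (h : a ∈ l) :
    PySem.List.index? l a = some (l.idxOf a) := by
  induction l with
  | nil => cases h
  | cons x xs ih =>
    by_cases hax : a = x
    · subst hax
      rw [PySem.List.index?_cons_self, List.idxOf_cons_self]
    · have hmem : a ∈ xs := by
        cases h with
        | head => exact absurd rfl hax
        | tail _ h' => exact h'
      rw [PySem.List.index?_cons_of_ne xs (Ne.symm hax), ih hmem,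
        List.idxOf_cons_ne xs (Ne.symm hax)]
      rfl

-- relative order of first occurrences survives filtering
theorem idxOf_filter_lt (p : String → Bool) (xs : List String) (a b : String)
    (ha : p a = true) (hb : p b = true) (hab : a ≠ b)
    (hma : a ∈ xs.filter p) (hmb : b ∈ xs.filter p)
    (h : (xs.filter p).idxOf a < (xs.filter p).idxOf b) :
    xs.idxOf a < xs.idxOf b := by
  induction xs with
  | nil => simp at hma
  | cons y ys ih =>
    cases hpy : p y with
    | false =>
      have hfilt : (y :: ys).filter p = ys.filter p := by
        simp [hpy]
      rw [hfilt] at hma hmb h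
      have hya : y ≠ a := fun hh => by rw [hh, ha] at hpy; cases hpy
      have hyb : y ≠ b := fun hh => by rw [hh, hb] at hpy; cases hpy
      rw [List.idxOf_cons_ne ys hya, List.idxOf_cons_ne ys hyb]
      exact Nat.succ_lt_succ (ih hma hmb h)
    | true =>
      have hfilt : (y :: ys).filter p = y :: ys.filter p := by
        simp [hpy]
      rw [hfilt] at hma hmb h
      by_cases hya : y = a
      · have hyb : y ≠ b := fun hh => hab (hya.symm.trans hh)
        rw [← hya, List.idxOf_cons_self, List.idxOf_cons_ne ys hyb]
        exact Nat.succ_pos _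
      · by_cases hyb : y = b
        · subst hyb
          rw [List.idxOf_cons_ne _ (fun hh => hya hh), List.idxOf_cons_self] at h
          omega
        · rw [List.idxOf_cons_ne _ hya, List.idxOf_cons_ne _ hyb] at h
          rw [List.idxOf_cons_ne ys hya, List.idxOf_cons_ne ys hyb]
          have hma' : a ∈ ys.filter p := by
            cases hma with
            | head => exact absurd rfl hya
            | tail _ hh => exact hh
          have hmb' : b ∈ ys.filter p := by
            cases hmb with
            | head => exact absurd rfl hyb
            | tail _ hh => exact hh
          exact Nat.succ_lt_succ (ih hma' hmb' (by omega))

-- membership in a set is preserved by add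
theorem mem_add_of_mem (s : PySem.Set String) (x y : String) (hx : x ∈ s) :
    x ∈ PySem.Set.add s y := by
  unfold PySem.Set.add
  split <;> simp [hx]

-- updating with a list is unchanged by dropping copies of an element already in the set
theorem update_filter (l : List String) (s : PySem.Set String) (x : String) (hx : x ∈ s) :
    PySem.Set.update s l = PySem.Set.update s (l.filter (fun t => t != x)) := by
  induction l generalizing s with
  | nil => rfl
  | cons y ys ih =>
    by_cases hy : y = x
    · subst hy
      rw [PySem.Set.update_cons, PySem.Set.add_of_mem hx]
      simpa using ih s hx
    · have : (y != x) = true := by simpa using hy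
      rw [List.filter_cons, if_pos this, PySem.Set.update_cons, PySem.Set.update_cons]
      exact ih (PySem.Set.add s y) (mem_add_of_mem s x y hx)

-- if x occurs nowhere in l, the leading x of the set just stays in front
theorem update_cons_of_not_mem (l : List String) (s : PySem.Set String) (x : String)
    (hx : x ∉ l) :
    PySem.Set.update (x :: s) l = x :: PySem.Set.update s l := by
  induction l generalizing s with
  | nil => rfl
  | cons y ys ih =>
    have hyx : y ≠ x := fun h => hx (h ▸ List.mem_cons_self)
    rw [PySem.Set.update_cons, PySem.Set.update_cons]
    have hadd : PySem.Set.add (x :: s) y = x :: PySem.Set.add s y := by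
      unfold PySem.Set.add PySem.Set.contains
      simp only [List.contains_cons]
      have : (y == x) = false := by simpa using hyx
      rw [this]
      simp only [Bool.false_or]
      split <;> simp
    rw [hadd]
    exact ih (PySem.Set.add s y) (fun h => hx (List.mem_cons_of_mem _ h))

-- head-step characterisation of ordered dedup
theorem dedup_cons_filter (x : String) (xs : List String) :
    PySem.List.dedup (x :: xs) = x :: PySem.List.dedup (xs.filter (fun t => t != x)) := by
  rw [PySem.List.dedup_eq_ofList, PySem.List.dedup_eq_ofList, PySem.Set.ofList_eq_foldl,
    PySem.Set.ofList_eq_foldl]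
  show PySem.Set.update PySem.Set.empty (x :: xs)
      = x :: PySem.Set.update PySem.Set.empty (xs.filter (fun t => t != x))
  rw [PySem.Set.update_cons]
  have hadd : PySem.Set.add PySem.Set.empty x = [x] := by
    unfold PySem.Set.add PySem.Set.contains PySem.Set.empty; simp
  rw [hadd, update_filter xs [x] x (by simp)]
  exact update_cons_of_not_mem _ _ _ (by simp)

-- ordered dedup lists elements in order of strictly increasing first index
theorem pairwise_idxOf_dedup (l : List String) :
    (PySem.List.dedup l).Pairwise (fun a b => l.idxOf a < l.idxOf b) := by
  induction hn : l.length using Nat.strong_induction_on generalizing l with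
  | _ n ihn =>
    match l with
    | [] => simp [PySem.List.dedup, PySem.Set.ofList]
    | x :: xs =>
      rw [dedup_cons_filter]
      rw [List.pairwise_cons]
      constructor
      · intro b hb
        have hbf : b ∈ xs.filter (fun t => t != x) := (PySem.List.mem_dedup _ _).mp hb
        have hbx : b ≠ x := by
          have := List.of_mem_filter hbf
          simpa using this
        rw [List.idxOf_cons_self, List.idxOf_cons_ne xs (Ne.symm hbx)]
        exact Nat.succ_pos _
      · subst hn
        have ihp := ihn (xs.filter (fun t => t != x)).length
          (Nat.lt_succ_of_le (List.length_filter_le _ _)) _ rfl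
        refine List.Pairwise.imp_of_mem ?_ ihp
        intro a b hma hmb hab'
        have hmaf : a ∈ xs.filter (fun t => t != x) := (PySem.List.mem_dedup _ _).mp hma
        have hmbf : b ∈ xs.filter (fun t => t != x) := (PySem.List.mem_dedup _ _).mp hmb
        have hax : a ≠ x := by simpa using List.of_mem_filter hmaf
        have hbx : b ≠ x := by simpa using List.of_mem_filter hmbf
        have hab : a ≠ b := fun hh => by rw [hh] at hab'; omega
        have hlt := idxOf_filter_lt (fun t => t != x) xs a b
          (by simpa using hax) (by simpa using hbx) hab hmaf hmbf hab'
        rw [List.idxOf_cons_ne xs (Ne.symm hax), List.idxOf_cons_ne xs (Ne.symm hbx)]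
        exact Nat.succ_lt_succ hlt

-- B's result is also the ordered dedup of the flattened input
theorem portB_eq_dedup (tools_lists : List (List String)) :
    merge_governed_tools_alt tools_lists
    = PySem.List.dedup (tools_lists.flatMap (fun ts => ts)) := by
  unfold merge_governed_tools_alt
  set flat : List String := tools_lists.flatMap (fun ts => ts) with hflat
  set first : PySem.Dict String Int :=
    (PySem.List.pyRange ((flat.length : Int) - 1) (-1) (-1)).foldl
      (fun d i => d.insert (PySem.List.pyGetD flat i "") i) PySem.Dict.empty with hfirst
  have hget : ∀ k : String, first.get? k
      = match PySem.List.index? flat k with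
        | some j => some (j : Int)
        | none => none := by
    intro k
    rw [hfirst, foldget]
    cases PySem.List.index? flat k <;> simp [PySem.Dict.get?, PySem.Dict.empty]
  have hmemkeys : ∀ k : String, k ∈ first.keys ↔ k ∈ flat := by
    intro k
    constructor
    · intro hk
      by_contra hnot
      have : first.get? k = none := by
        rw [hget k, (PySem.List.index?_eq_none_iff flat k).mpr hnot]
      exact ((PySem.Dict.get?_eq_none_iff_not_mem_keys first k).mp this) hk
    · intro hk
      by_contra hnot
      have hnone := (PySem.Dict.get?_eq_none_iff_not_mem_keys first k).mpr hnot
      rw [hget k, index?_eq_some_idxOf flat k hk] at hnone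
      simp at hnone
  have hnodup : first.keys.Nodup := by
    rw [hfirst]
    exact PySem.Dict.nodup_keys_foldl_insert_key _
      (fun i => PySem.List.pyGetD flat i "") (fun _ i => i) _ (by simp [PySem.Dict.empty, PySem.Dict.keys])
  have hgetD : ∀ k ∈ flat, first.getD k 0 = ((flat.idxOf k : Nat) : Int) := by
    intro k hk
    have h1 : first.get? k = some ((flat.idxOf k : Nat) : Int) := by
      rw [hget k, index?_eq_some_idxOf flat k hk]
    have h2 : first.getD k 0 = (first.get? k).getD 0 := by
      simp [PySem.Dict.getD, PySem.Dict.get?]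
    rw [h2, h1]
    rfl
  have hperm : (PySem.List.dedup flat).Perm first.keys := by
    rw [List.perm_ext_iff_of_nodup (PySem.List.nodup_dedup flat) hnodup]
    intro k
    rw [PySem.List.mem_dedup, hmemkeys]
  have hpair : (PySem.List.dedup flat).Pairwise
      (fun a b => first.getD a 0 < first.getD b 0) := by
    refine List.Pairwise.imp_of_mem ?_ (pairwise_idxOf_dedup flat)
    intro a b hma hmb hlt
    rw [hgetD a ((PySem.List.mem_dedup _ _).mp hma),
      hgetD b ((PySem.List.mem_dedup _ _).mp hmb)]
    exact_mod_cast hlt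
  exact PySem.List.sorted_eq_of_perm_of_pairwise_lt _ _ _ hperm hpair

-- ===== VERDICT =====
theorem merge_governed_tools_spec : Claim_equal_merge_governed_tools := by
  intro tools_lists _
  unfold Spec_merge_governed_tools
  rw [portA_eq_dedup, portB_eq_dedup]
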